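-- pv_equiv track=rewrite | github.com/AdarshSekar04/Causal-Consistent-Key-Value-Store | app.py | compare_causal_context
-- ===== SOURCE A (Python) =====
-- def compare_causal_context(cc1, cc2):
--     # check for cc2 -> cc1
--     seenStrictOrder = False
--
--     for key in cc1:
--         if key in cc2:
--             # if any key in cc2 is greater than the key in cc1, break
--             if cc2[key] > cc1[key]:
--                 return False
--                 break
--             if cc2[key] < cc1[key]:
--                 seenStrictOrder = True
--                 continue
--             if cc2[key] == cc1[key]:
--                 continue
--     for key in cc2:
--         if key not in cc1 and cc2[key] > 0:
--             return False
--
--     return True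
-- ===== SOURCE B (Python) =====
-- def compare_causal_context(cc1, cc2):
--     # cc2 -> cc1 iff every entry of cc2 is dominated by cc1 (missing keys count as 0)
--     return all(cc2[k] <= cc1.get(k, 0) for k in cc2)
-- ===== Notes on version B (the rewrite author's own statement) =====
-- stated objective: simpler
-- what changed: A's two separate loops (shared keys of cc1 vs cc2-only keys) are collapsed into one all(...) pass over cc2 using cc1.get(k, 0) to unify both cases, dropping the dead seenStrictOrder state.
import Mathlib
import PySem

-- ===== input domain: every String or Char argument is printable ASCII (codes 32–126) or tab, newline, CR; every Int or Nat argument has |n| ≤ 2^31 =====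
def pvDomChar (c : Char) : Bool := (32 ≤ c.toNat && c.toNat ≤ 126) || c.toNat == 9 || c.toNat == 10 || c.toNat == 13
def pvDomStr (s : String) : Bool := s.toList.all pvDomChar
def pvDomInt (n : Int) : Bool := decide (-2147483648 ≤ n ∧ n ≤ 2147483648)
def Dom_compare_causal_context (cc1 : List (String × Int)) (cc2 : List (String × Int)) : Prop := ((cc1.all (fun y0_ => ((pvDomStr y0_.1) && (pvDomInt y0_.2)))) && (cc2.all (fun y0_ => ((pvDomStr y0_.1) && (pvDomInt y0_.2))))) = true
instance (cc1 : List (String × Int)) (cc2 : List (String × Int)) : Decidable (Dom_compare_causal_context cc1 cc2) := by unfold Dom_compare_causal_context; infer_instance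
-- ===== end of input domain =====

-- B collapses A's two loops (shared keys of cc1, then cc2-only keys) into one pass over cc2
-- with a defaulted lookup cc1.get(k, 0); simpler, same result.


-- ===== PORT A =====
-- first loop: 'for key in cc1' with the three comparison branches and the (dead) seenStrictOrder flag
def ccLoopShared (d1 d2 : PySem.Dict String Int) : List String → Bool → Bool
  | [], _seen => true
  | k :: rest, seen =>
    if d2.contains k then
      if d1.getD k 0 < d2.getD k 0 then false
      else if d2.getD k 0 < d1.getD k 0 then ccLoopShared d1 d2 rest true
      else ccLoopShared d1 d2 rest seen
    else ccLoopShared d1 d2 rest seen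

-- second loop: 'for key in cc2: if key not in cc1 and cc2[key] > 0: return False'
def ccLoopOnly2 (d1 d2 : PySem.Dict String Int) : List String → Bool
  | [] => true
  | k :: rest =>
    if !(d1.contains k) && decide (0 < d2.getD k 0) then false
    else ccLoopOnly2 d1 d2 rest

def compare_causal_context (cc1 : List (String × Int)) (cc2 : List (String × Int)) : Bool :=
  let d1 := PySem.Dict.mk cc1
  let d2 := PySem.Dict.mk cc2
  if ccLoopShared d1 d2 d1.keys false then ccLoopOnly2 d1 d2 d2.keys else false

-- ===== PORT B =====
def compare_causal_context_alt (cc1 : List (String × Int)) (cc2 : List (String × Int)) : Bool :=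
  let d1 := PySem.Dict.mk cc1
  let d2 := PySem.Dict.mk cc2
  d2.keys.all (fun k => decide (d2.getD k 0 ≤ d1.getD k 0))

-- ===== PRECONDITION & SPEC =====
def Spec_compare_causal_context (cc1 : List (String × Int)) (cc2 : List (String × Int)) (out : Bool) : Prop := out = compare_causal_context_alt cc1 cc2
instance (cc1 : List (String × Int)) (cc2 : List (String × Int)) (out : Bool) : Decidable (Spec_compare_causal_context cc1 cc2 out) := by unfold Spec_compare_causal_context; infer_instance

-- ===== CLAIM (what is proved, stated in full; the proofs are below) =====
def Claim_equal_compare_causal_context : Prop := ∀ (cc1 : List (String × Int)) (cc2 : List (String × Int)), Dom_compare_causal_context cc1 cc2 → Spec_compare_causal_context cc1 cc2 (compare_causal_context cc1 cc2)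

-- ===== LEMMAS AND PROOFS =====
theorem ccLoopShared_eq_all (d1 d2 : PySem.Dict String Int) (ks : List String) (seen : Bool) :
    ccLoopShared d1 d2 ks seen =
      ks.all (fun k => !(d2.contains k && decide (d1.getD k 0 < d2.getD k 0))) := by
  induction ks generalizing seen with
  | nil => rfl
  | cons k rest ih =>
    simp only [ccLoopShared, List.all_cons]
    by_cases hc : d2.contains k = true
    · rw [if_pos hc]
      by_cases h1 : d1.getD k 0 < d2.getD k 0
      · rw [if_pos h1]; simp [hc, h1]
      · rw [if_neg h1]
        have hh : (!(d2.contains k && decide (d1.getD k 0 < d2.getD k 0))) = true := by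
          simp [hc, h1]
        split_ifs with h2 <;> rw [hh, Bool.true_and] <;> exact ih _
    · rw [if_neg hc]
      have hcf : d2.contains k = false := by simpa using hc
      have hh : (!(d2.contains k && decide (d1.getD k 0 < d2.getD k 0))) = true := by
        simp [hcf]
      rw [hh, Bool.true_and]; exact ih _

theorem ccLoopOnly2_eq_all (d1 d2 : PySem.Dict String Int) (ks : List String) :
    ccLoopOnly2 d1 d2 ks =
      ks.all (fun k => !(!(d1.contains k) && decide (0 < d2.getD k 0))) := by
  induction ks with
  | nil => rfl
  | cons k rest ih =>
    simp only [ccLoopOnly2, List.all_cons, ih]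
    by_cases h : (!(d1.contains k) && decide (0 < d2.getD k 0)) = true
    · rw [if_pos h]; simp [h]
    · rw [if_neg h]
      have hh : (!(!(d1.contains k) && decide (0 < d2.getD k 0))) = true := by
        rw [Bool.not_eq_true] at h; simp [h]
      rw [hh, Bool.true_and]

-- ===== VERDICT (by name: the statement is the Claim_ definition above) =====
theorem compare_causal_context_spec : Claim_equal_compare_causal_context := by
  intro cc1 cc2 _
  unfold Spec_compare_causal_context compare_causal_context compare_causal_context_alt
  dsimp only
  rw [ccLoopShared_eq_all, ccLoopOnly2_eq_all]
  set d1 := PySem.Dict.mk cc1 with hd1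
  set d2 := PySem.Dict.mk cc2 with hd2
  by_cases hA : (d1.keys.all fun k => !(d2.contains k && decide (d1.getD k 0 < d2.getD k 0))) = true
  · rw [if_pos hA]
    simp only [List.all_eq_true, Bool.not_eq_eq_eq_not, Bool.not_true, Bool.and_eq_false_iff,
      decide_eq_false_iff_not, not_lt] at hA
    rw [Bool.eq_iff_iff]
    simp only [List.all_eq_true, Bool.not_eq_eq_eq_not, Bool.not_true, Bool.and_eq_false_iff,
      decide_eq_false_iff_not, not_lt, decide_eq_true_eq]
    constructor
    · intro h2 k hk
      by_cases hc : d1.contains k = true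
      · have hk1 : k ∈ d1.keys := (PySem.Dict.contains_iff_mem_keys d1 k).mp hc
        have hc2 : d2.contains k = true := (PySem.Dict.contains_iff_mem_keys d2 k).mpr hk
        rcases hA k hk1 with h | h
        · rw [hc2] at h; cases h
        · exact h
      · have hcf : d1.contains k = false := by simpa using hc
        rw [PySem.Dict.getD_of_not_contains d1 0 hcf]
        rcases h2 k hk with h | h
        · rw [hcf] at h; cases h
        · exact h
    · intro h k hk
      by_cases hc : d1.contains k = true
      · exact Or.inl hc
      · have hcf : d1.contains k = false := by simpa using hc
        have hv := h k hk
        rw [PySem.Dict.getD_of_not_contains d1 0 hcf] at hv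
        exact Or.inr hv
  · rw [if_neg hA]
    simp only [List.all_eq_true, Bool.not_eq_eq_eq_not, Bool.not_true, Bool.and_eq_false_iff,
      decide_eq_false_iff_not, not_lt, not_forall] at hA
    obtain ⟨k, hk1, hA⟩ := hA
    have hc2 : d2.contains k = true := by
      rcases Bool.eq_false_or_eq_true (d2.contains k) with ht | hf
      · exact ht
      · exact absurd (Or.inl hf) hA
    have hlt : d1.getD k 0 < d2.getD k 0 := by
      by_contra hle
      exact hA (Or.inr (not_lt.mp hle))
    have hk2 : k ∈ d2.keys := (PySem.Dict.contains_iff_mem_keys d2 k).mp hc2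
    symm
    rw [List.all_eq_false]
    exact ⟨k, hk2, by simp [not_le, hlt]⟩
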